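-- pv_equiv track=rewrite | github.com/gohaam/Pem-Fungsional | modul3/tugas1.py | baris_aritmetika_geometri
-- ===== SOURCE A (Python) =====
-- def baris_aritmetika_geometri(a, d, r, n):
--     if n == 1:
--         return [a]
--     else:
--         # Menghasilkan baris hingga suku ke-n secara rekursif
--         deret = baris_aritmetika_geometri(a, d, r, n - 1)
--         # Menghitung suku ke-n berdasarkan rumus
--         suku_ke_n = (a + (n - 1) * d) * (r ** (n - 1))
--         deret.append(suku_ke_n)
--         return deret
-- ===== SOURCE B (Python) =====
-- def baris_aritmetika_geometri(a, d, r, n):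
--     # iterative: one list comprehension over range(n)
--     return [(a + k * d) * r ** k for k in range(n)]
-- ===== Notes on version B (the rewrite author's own statement) =====
-- stated objective: idiomatic
-- what changed: Replaced the recursion (which builds the list by appending after the recursive call) with a single list comprehension over range(n); also avoids Python's recursion-depth limit.
import Mathlib
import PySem

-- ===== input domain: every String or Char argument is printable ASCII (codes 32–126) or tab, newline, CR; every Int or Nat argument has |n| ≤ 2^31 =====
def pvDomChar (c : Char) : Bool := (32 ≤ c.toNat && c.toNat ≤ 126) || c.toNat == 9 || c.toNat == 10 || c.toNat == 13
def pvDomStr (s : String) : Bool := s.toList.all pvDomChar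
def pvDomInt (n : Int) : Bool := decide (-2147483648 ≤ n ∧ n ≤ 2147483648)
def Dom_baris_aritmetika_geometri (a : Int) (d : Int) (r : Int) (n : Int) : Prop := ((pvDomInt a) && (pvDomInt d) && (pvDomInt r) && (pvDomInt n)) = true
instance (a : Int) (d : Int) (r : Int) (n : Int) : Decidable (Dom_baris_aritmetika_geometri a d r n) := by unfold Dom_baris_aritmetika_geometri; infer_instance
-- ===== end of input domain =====

-- B replaces A's recursion with one list comprehension over range(n) (idiomatic); return-value equivalence on n ≥ 1.

-- ===== PORT A =====
-- A recurses on n-1 with base case n == 1; for n < 1 Python never reaches the base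
-- case (RecursionError). The `n ≤ 1 → []` branch only totalises that divergent region,
-- which Pre_ excludes.
def baris_aritmetika_geometri (a : Int) (d : Int) (r : Int) (n : Int) : List Int :=
  if n = 1 then [a]
  else if n ≤ 1 then []
  else
    baris_aritmetika_geometri a d r (n - 1) ++ [(a + (n - 1) * d) * r ^ (n - 1).toNat]
termination_by n.toNat
decreasing_by omega

-- ===== PORT B =====
def baris_aritmetika_geometri_alt (a : Int) (d : Int) (r : Int) (n : Int) : List Int :=
  (List.range n.toNat).map (fun (k : Nat) => (a + (k : Int) * d) * r ^ k)

-- ===== PRECONDITION & SPEC =====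
-- Pre_ excludes n ≤ 0, on which the Python A raises RecursionError (no base case).
def Pre_baris_aritmetika_geometri (a : Int) (d : Int) (r : Int) (n : Int) : Prop := 1 ≤ n
instance (a : Int) (d : Int) (r : Int) (n : Int) : Decidable (Pre_baris_aritmetika_geometri a d r n) := by unfold Pre_baris_aritmetika_geometri; infer_instance
def pvWitness_baris_aritmetika_geometri : Int × Int × Int × Int := (2, 3, 2, 4)

def Spec_baris_aritmetika_geometri (a : Int) (d : Int) (r : Int) (n : Int) (out : List Int) : Prop := out = baris_aritmetika_geometri_alt a d r n
instance (a : Int) (d : Int) (r : Int) (n : Int) (out : List Int) : Decidable (Spec_baris_aritmetika_geometri a d r n out) := by unfold Spec_baris_aritmetika_geometri; infer_instance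

-- ===== CLAIM =====
def Claim_equal_baris_aritmetika_geometri : Prop := ∀ (a : Int) (d : Int) (r : Int) (n : Int), Dom_baris_aritmetika_geometri a d r n → Pre_baris_aritmetika_geometri a d r n → Spec_baris_aritmetika_geometri a d r n (baris_aritmetika_geometri a d r n)

-- ===== LEMMAS AND PROOFS =====
theorem bag_eq_alt (a d r : Int) : ∀ (m : Nat) (n : Int), n.toNat = m → 1 ≤ n →
    baris_aritmetika_geometri a d r n = baris_aritmetika_geometri_alt a d r n := by
  intro m
  induction m using Nat.strong_induction_on with
  | _ m ih =>
    intro n hm hn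
    rw [baris_aritmetika_geometri]
    by_cases h1 : n = 1
    · subst h1
      unfold baris_aritmetika_geometri_alt
      norm_num [List.range_succ]
    · have h2 : 2 ≤ n := by omega
      rw [if_neg h1, if_neg (by omega)]
      rw [ih (n - 1).toNat (by omega) (n - 1) rfl (by omega)]
      unfold baris_aritmetika_geometri_alt
      have hr : n.toNat = (n - 1).toNat + 1 := by omega
      rw [hr, List.range_succ, List.map_append, List.map_cons, List.map_nil]
      have hc : ((n - 1).toNat : Int) = n - 1 := by omega
      rw [hc]

-- ===== VERDICT =====
theorem baris_aritmetika_geometri_spec : Claim_equal_baris_aritmetika_geometri := by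
  intro a d r n _ hpre
  exact bag_eq_alt a d r n.toNat n rfl hpre
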